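-- pv_equiv track=rewrite | github.com/idk-who/My_GFG_Solutions | Difficulty: Medium/Nth Natural Number/nth-natural-number.py | findNth
-- ===== SOURCE A (Python) =====
-- def findNth(n):
--     ans = 0
--     base = 1
--
--     while n:
--         ans += (n%9)*base
--         base *= 10
--         n //= 9
--
--     return ans
-- ===== SOURCE B (Python) =====
-- def findNth(n):
--     digits = []
--     while n:
--         digits.append(n % 9)
--         n //= 9
--     result = 0
--     for d in reversed(digits):
--         result = result * 10 + d
--     return result
-- ===== Notes on version B (the rewrite author's own statement) =====
-- stated objective: alternative
-- what changed: B collects the base-9 remainders into a list and then reassembles the decimal value with a Horner fold over the reversed digit list, instead of A's single pass that accumulates with a running power-of-ten multiplier.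
import Mathlib
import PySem

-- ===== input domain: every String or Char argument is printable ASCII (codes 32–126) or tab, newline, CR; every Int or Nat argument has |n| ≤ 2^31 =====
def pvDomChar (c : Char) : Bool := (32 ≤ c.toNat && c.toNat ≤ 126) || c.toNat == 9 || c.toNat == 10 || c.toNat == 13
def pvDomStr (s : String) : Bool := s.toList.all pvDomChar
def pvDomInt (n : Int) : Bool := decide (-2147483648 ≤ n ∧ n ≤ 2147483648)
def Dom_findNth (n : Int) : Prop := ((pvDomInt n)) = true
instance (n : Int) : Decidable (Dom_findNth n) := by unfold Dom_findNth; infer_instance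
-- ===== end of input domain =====

-- B re-reads n's base-9 digits as decimal by collecting the remainders and Horner-folding
-- the reversed digit list, instead of A's running power-of-ten accumulator (alternative).

-- ===== PORT A =====
-- A's while-loop; fuel (n.toNat + 1, ample since iterations ≤ log9 n + 1) only makes the loop total
def findNthGo : Nat → Int → Int → Int → Int
  | 0, _, ans, _ => ans
  | fuel + 1, n, ans, base =>
    if n = 0 then ans
    else findNthGo fuel (PySem.Int.floordiv n 9) (ans + (PySem.Int.mod n 9) * base) (base * 10)

def findNth (n : Int) : Int := findNthGo (n.toNat + 1) n 0 1

-- ===== PORT B =====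
-- B's first loop: collect remainders into a list (same fuel-totalisation)
def digitsGo : Nat → Int → List Int → List Int
  | 0, _, acc => acc
  | fuel + 1, n, acc =>
    if n = 0 then acc
    else digitsGo fuel (PySem.Int.floordiv n 9) (acc ++ [PySem.Int.mod n 9])

-- B's second loop: Horner fold over the reversed digit list
def findNth_alt (n : Int) : Int :=
  ((digitsGo (n.toNat + 1) n []).reverse).foldl (fun r d => r * 10 + d) 0

-- ===== PRECONDITION & SPEC =====
-- Pre_ excludes n < 0, where Python A's loop never terminates (n //= 9 stays negative).
def Pre_findNth (n : Int) : Prop := 0 ≤ n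
instance (n : Int) : Decidable (Pre_findNth n) := by unfold Pre_findNth; infer_instance
def pvWitness_findNth : Int := (81)
def Spec_findNth (n : Int) (out : Int) : Prop := out = findNth_alt n
instance (n : Int) (out : Int) : Decidable (Spec_findNth n out) := by unfold Spec_findNth; infer_instance

-- ===== CLAIM (what is proved, stated in full; the proofs are below) =====
def Claim_equal_findNth : Prop := ∀ (n : Int), Dom_findNth n → Pre_findNth n → Spec_findNth n (findNth n)

-- ===== LEMMAS AND PROOFS =====

-- the value both programs compute: base-9 digits of m read as decimal
def decOfBase9 : Nat → Int
  | m =>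
    if h : m = 0 then 0
    else ((m % 9 : Nat) : Int) + 10 * decOfBase9 (m / 9)
  termination_by m => m
  decreasing_by exact Nat.div_lt_self (Nat.pos_of_ne_zero h) (by omega)

-- the digit list B collects
def digitListN : Nat → List Int
  | m =>
    if h : m = 0 then []
    else ((m % 9 : Nat) : Int) :: digitListN (m / 9)
  termination_by m => m
  decreasing_by exact Nat.div_lt_self (Nat.pos_of_ne_zero h) (by omega)

lemma findNthGo_eq (fuel : Nat) : ∀ (n ans base : Int), 0 ≤ n → n.toNat < fuel →
    findNthGo fuel n ans base = ans + base * decOfBase9 n.toNat := by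
  induction fuel with
  | zero => intro n ans base _ h; omega
  | succ fuel ih =>
    intro n ans base hn hf
    rw [findNthGo]
    by_cases h0 : n = 0
    · simp [h0, decOfBase9]
    · have hpos : 0 < n := lt_of_le_of_ne hn (Ne.symm h0)
      have hfd : PySem.Int.floordiv n 9 = n / 9 := PySem.Int.floordiv_eq_ediv_of_pos (by omega)
      have hmd : PySem.Int.mod n 9 = n % 9 := PySem.Int.mod_eq_emod_of_pos (by omega)
      have hle : (0:Int) ≤ n / 9 := Int.ediv_nonneg hn (by omega)
      have htn : (n / 9).toNat = n.toNat / 9 := by omega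
      have hlt : (n / 9).toNat < fuel := by
        rw [htn]; have := Nat.div_lt_self (by omega : 0 < n.toNat) (by omega : 1 < 9); omega
      rw [if_neg h0, hfd, hmd, ih _ _ _ hle hlt]
      conv_rhs => rw [decOfBase9]
      rw [dif_neg (by omega : n.toNat ≠ 0)]
      have hm : ((n.toNat % 9 : Nat) : Int) = n % 9 := by omega
      rw [htn, hm]
      ring

lemma digitsGo_eq (fuel : Nat) : ∀ (n : Int) (acc : List Int), 0 ≤ n → n.toNat < fuel →
    digitsGo fuel n acc = acc ++ digitListN n.toNat := by
  induction fuel with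
  | zero => intro n acc _ h; omega
  | succ fuel ih =>
    intro n acc hn hf
    rw [digitsGo]
    by_cases h0 : n = 0
    · simp [h0, digitListN]
    · have hpos : 0 < n := lt_of_le_of_ne hn (Ne.symm h0)
      have hfd : PySem.Int.floordiv n 9 = n / 9 := PySem.Int.floordiv_eq_ediv_of_pos (by omega)
      have hmd : PySem.Int.mod n 9 = n % 9 := PySem.Int.mod_eq_emod_of_pos (by omega)
      have hle : (0:Int) ≤ n / 9 := Int.ediv_nonneg hn (by omega)
      have htn : (n / 9).toNat = n.toNat / 9 := by omega
      have hlt : (n / 9).toNat < fuel := by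
        rw [htn]; have := Nat.div_lt_self (by omega : 0 < n.toNat) (by omega : 1 < 9); omega
      rw [if_neg h0, hfd, hmd, ih _ _ hle hlt]
      conv_rhs => rw [digitListN]
      rw [dif_neg (by omega : n.toNat ≠ 0)]
      have hm : ((n.toNat % 9 : Nat) : Int) = n % 9 := by omega
      rw [htn, hm]
      simp

lemma horner_digitListN (m : Nat) : ∀ (r : Int),
    ((digitListN m).reverse).foldl (fun r d => r * 10 + d) r
      = r * 10 ^ (digitListN m).length + decOfBase9 m := by
  induction m using Nat.strong_induction_on with
  | _ m ih =>
    intro r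
    rw [digitListN, decOfBase9]
    by_cases h0 : m = 0
    · simp [h0]
    · rw [dif_neg h0, dif_neg h0]
      have hlt : m / 9 < m := Nat.div_lt_self (Nat.pos_of_ne_zero h0) (by omega)
      simp only [List.reverse_cons, List.foldl_append, List.foldl_cons, List.foldl_nil,
        List.length_cons]
      rw [ih _ hlt r]
      ring

theorem findNth_spec_aux (n : Int) (hn : 0 ≤ n) : findNth n = findNth_alt n := by
  unfold findNth findNth_alt
  rw [findNthGo_eq _ n 0 1 hn (by omega), digitsGo_eq _ n [] hn (by omega)]
  rw [List.nil_append, horner_digitListN]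
  ring

-- ===== VERDICT (by name: the statement is the Claim_ definition above) =====
theorem findNth_spec : Claim_equal_findNth := by
  intro n _ hpre
  unfold Spec_findNth
  exact findNth_spec_aux n hpre
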